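-- pv_equiv track=rewrite | github.com/cdnilsen/eliot-web | python/massSearch.py | cleanLine
-- ===== SOURCE A (Python) =====
-- def cleanLine(line):
--     line = " ".join(line.split(" ")[1:])
--
--     line = line.replace("|", " ")
--     punctuation = [".", ",", ";", "?", "!", "-", ":", "'", '"', "(", ")", "{", "}", "$", "[", "]"]
--
--     for char in punctuation:
--         line = line.replace(char, "")
--
--     line = line.lower()
--
--     return line.split(" ")
-- ===== SOURCE B (Python) =====
-- def cleanLine(line):
--     rest = " ".join(line.split(" ")[1:])
--     punct = set(".,;?!-:'\"(){}$[]")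
--     cleaned = "".join((" " if c == "|" else c) for c in rest if c not in punct)
--     return cleaned.lower().split(" ")
-- ===== Notes on version B (the rewrite author's own statement) =====
-- stated objective: simpler
-- what changed: Replaces the 17 full-string replace() scans (one per punctuation mark) with a single pass over the characters: a comprehension that maps the pipe character to a space and drops characters found in a punctuation set.
import Mathlib
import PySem

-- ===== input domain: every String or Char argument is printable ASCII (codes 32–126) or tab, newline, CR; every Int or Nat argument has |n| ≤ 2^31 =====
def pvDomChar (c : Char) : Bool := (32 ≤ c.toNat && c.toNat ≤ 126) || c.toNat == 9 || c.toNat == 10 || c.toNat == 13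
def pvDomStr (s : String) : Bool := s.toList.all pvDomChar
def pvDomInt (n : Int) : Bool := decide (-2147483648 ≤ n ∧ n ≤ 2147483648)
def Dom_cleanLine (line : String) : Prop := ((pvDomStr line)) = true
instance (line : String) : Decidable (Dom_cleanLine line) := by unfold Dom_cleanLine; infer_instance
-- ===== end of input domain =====

-- B makes one pass over the characters (dropping punctuation-set members, mapping the pipe character to a space) instead of A's 17 replace() scans; return values proved equal.

-- ===== PORT A =====
def cleanLine (line : String) : List String :=
  let line1 := PySem.Str.join " " (PySem.List.slice ((PySem.Str.split? line " ").getD []) (some (1:Int)) none)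
  let line2 := PySem.Str.replace line1 "|" " "
  let punctuation : List String := [".", ",", ";", "?", "!", "-", ":", "'", "\"", "(", ")", "{", "}", "$", "[", "]"]
  let line3 := punctuation.foldl (fun l ch => PySem.Str.replace l ch "") line2
  let line4 := PySem.Str.lower line3
  (PySem.Str.split? line4 " ").getD []

-- ===== PORT B =====
def pvPunct : PySem.Set Char := PySem.Set.ofList ['.', ',', ';', '?', '!', '-', ':', '\'', '\"', '(', ')', '{', '}', '$', '[', ']']

def cleanLine_alt (line : String) : List String :=
  let rest := PySem.Str.join " " (PySem.List.slice ((PySem.Str.split? line " ").getD []) (some (1:Int)) none)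
  let cleaned := String.ofList ((rest.toList.filter (fun c => !(PySem.Set.contains pvPunct c))).map
      (fun c => if c = '|' then ' ' else c))
  (PySem.Str.split? (PySem.Str.lower cleaned) " ").getD []

-- ===== PRECONDITION & SPEC =====
def Spec_cleanLine (line : String) (out : List String) : Prop := out = cleanLine_alt line
instance (line : String) (out : List String) : Decidable (Spec_cleanLine line out) := by unfold Spec_cleanLine; infer_instance

-- ===== CLAIM (what is proved, stated in full; the proofs are below) =====
def Claim_equal_cleanLine : Prop := ∀ (line : String), Dom_cleanLine line → Spec_cleanLine line (cleanLine line)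

-- ===== LEMMAS AND PROOFS =====

-- str.replace with a single-character pattern processes the characters one by one
theorem replace_go_single (c : Char) (new : List Char) :
    ∀ (fuel : Nat) (l acc : List Char), l.length ≤ fuel →
      PySem.Chars.replace.go [c] new fuel l acc
        = acc.reverse ++ l.flatMap (fun x => if x = c then new else [x]) := by
  intro fuel
  induction fuel with
  | zero =>
    intro l acc h
    have : l = [] := List.eq_nil_of_length_eq_zero (Nat.le_zero.mp h)
    subst this
    simp [PySem.Chars.replace.go]
  | succ n ih =>
    intro l acc h
    cases l with
    | nil => simp [PySem.Chars.replace.go]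
    | cons x t =>
      by_cases hx : x = c
      · subst hx
        have hpre : List.isPrefixOf [x] (x :: t) = true := by simp [List.isPrefixOf]
        simp only [PySem.Chars.replace.go, hpre, if_pos]
        have hd : List.drop [x].length (x :: t) = t := rfl
        rw [hd, ih t (new.reverse ++ acc) (by simpa using Nat.le_of_succ_le_succ h)]
        simp
      · have hpre : List.isPrefixOf [c] (x :: t) = false := by
          simp [List.isPrefixOf]; exact fun hc => (hx hc.symm).elim
        simp only [PySem.Chars.replace.go, hpre]
        rw [ih t (x :: acc) (by simpa using Nat.le_of_succ_le_succ h)]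
        simp [hx]

theorem replace_single (cs : List Char) (c : Char) (new : List Char) :
    PySem.Chars.replace cs [c] new = cs.flatMap (fun x => if x = c then new else [x]) := by
  rw [PySem.Chars.replace]
  simp [replace_go_single c new cs.length cs [] (le_refl _)]

theorem replace_del (cs : List Char) (c : Char) :
    PySem.Chars.replace cs [c] [] = cs.filter (fun x => x ≠ c) := by
  rw [replace_single]
  induction cs with
  | nil => rfl
  | cons x t ih => by_cases hx : x = c <;> simp [hx, ih]

theorem replace_map (cs : List Char) :
    PySem.Chars.replace cs ['|'] [' '] = cs.map (fun x => if x = '|' then ' ' else x) := by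
  rw [replace_single]
  induction cs with
  | nil => rfl
  | cons x t ih => by_cases hx : x = '|' <;> simp [hx, ih]

-- folding single-character deletions over a list of characters is one filter
theorem fold_replace_del (ps : List Char) (cs : List Char) :
    ps.foldl (fun l c => PySem.Chars.replace l [c] []) cs
      = cs.filter (fun x => !(ps.contains x)) := by
  induction ps generalizing cs with
  | nil => simp
  | cons p ps ih =>
    rw [List.foldl_cons, replace_del, ih, List.filter_filter]
    apply List.filter_congr
    intro x _
    by_cases hxp : x = p <;> simp [hxp]

-- the String-level replace fold seen on the character lists
theorem fold_toList (ss : List String) (s : String) :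
    (ss.foldl (fun l ch => PySem.Str.replace l ch "") s).toList
      = ss.foldl (fun l ch => PySem.Chars.replace l ch.toList []) s.toList := by
  induction ss generalizing s with
  | nil => rfl
  | cons a t ih =>
    simp only [List.foldl_cons, ih, PySem.Str.toList_replace]
    rfl

def pvPunctStrs : List String := [".", ",", ";", "?", "!", "-", ":", "'", "\"", "(", ")", "{", "}", "$", "[", "]"]

theorem pvPunct_eq : (pvPunct : List Char) = ['.', ',', ';', '?', '!', '-', ':', '\'', '\"', '(', ')', '{', '}', '$', '[', ']'] := by
  decide

theorem fold_strs_eq (init : List Char) :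
    pvPunctStrs.foldl (fun l ch => PySem.Chars.replace l ch.toList []) init
      = pvPunct.foldl (fun l c => PySem.Chars.replace l [c] []) init := by
  rw [← List.foldl_map (f := String.toList) (g := fun l cl => PySem.Chars.replace l cl []),
      pvPunct_eq,
      ← List.foldl_map (f := fun c => [c]) (g := fun l cl => PySem.Chars.replace l cl [])]
  rfl

set_option maxRecDepth 8192 in
set_option maxHeartbeats 4000000 in
theorem cleanLine_spec : Claim_equal_cleanLine := by
  intro line _
  unfold Spec_cleanLine cleanLine cleanLine_alt
  dsimp only
  set rest := PySem.Str.join " " (PySem.List.slice ((PySem.Str.split? line " ").getD []) (some (1:Int)) none)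
  have h1 : (pvPunctStrs.foldl (fun l ch => PySem.Str.replace l ch "") (PySem.Str.replace rest "|" " ")).toList
      = (rest.toList.filter (fun c => !(PySem.Set.contains pvPunct c))).map (fun c => if c = '|' then ' ' else c) := by
    rw [fold_toList, fold_strs_eq, fold_replace_del]
    have h2 : (PySem.Str.replace rest "|" " ").toList = rest.toList.map (fun x => if x = '|' then ' ' else x) := by
      have e1 : ("|" : String).toList = ['|'] := rfl
      have e2 : (" " : String).toList = [' '] := rfl
      rw [PySem.Str.toList_replace, e1, e2]
      exact replace_map rest.toList
    rw [h2, List.filter_map]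
    refine congrArg (List.map _) (List.filter_congr ?_)
    intro x _
    by_cases hx : x = '|'
    · subst hx; decide
    · simp [Function.comp, if_neg hx, PySem.Set.contains_eq_listContains, pvPunct_eq]
  have hfold := congrArg String.ofList h1
  rw [String.ofList_toList] at hfold
  rw [show ([".", ",", ";", "?", "!", "-", ":", "'", "\"", "(", ")", "{", "}", "$", "[", "]"] : List String) = pvPunctStrs from rfl]
  rw [hfold]

-- ===== VERDICT (by name: the statement is the Claim_ definition above) =====
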